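-- pv_equiv track=rewrite | github.com/MohamedAamil/Assignments | TodoList.py | check_order
-- ===== SOURCE A (Python) =====
-- def check_order(todo, impor , dead):
--     dictionary = {'Very High':1 , 'High':2 , 'Normal':3 , 'Low':4}
--     list1 = []
--
--     for i in impor:
--         list1.append(dictionary[i])
--
--     zipped_lists = zip(list1, todo, dead)
--     sorted_pairs = sorted(zipped_lists)
--
--     tuples = zip(*sorted_pairs)
--     impor, todo , dead = [list(tuple) for tuple in tuples]
--
--     for i in dictionary:
--         for j in range(len(impor)):
--             if dictionary[i] == impor[j]:
--                 impor[j] = i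
--
--
--     return todo, impor , dead
-- ===== SOURCE B (Python) =====
-- def check_order(todo, impor, dead):
--     priority = {'Very High': 1, 'High': 2, 'Normal': 3, 'Low': 4}
--     names = {1: 'Very High', 2: 'High', 3: 'Normal', 4: 'Low'}
--     nums = [priority[i] for i in impor]
--     triples = list(zip(nums, todo, dead))
--     ordered = []
--     for p in (1, 2, 3, 4):
--         ordered.extend(sorted(t for t in triples if t[0] == p))
--     nums_s, todo_s, dead_s = (list(c) for c in zip(*ordered))
--     return todo_s, [names[p] for p in nums_s], dead_s
-- ===== Notes on version B (the rewrite author's own statement) =====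
-- stated objective: alternative
-- what changed: B replaces A's single comparison sort over (priority, todo, deadline) triples plus the nested int-to-name replacement loops by a bucket pass: filter the triples per priority 1..4, sort each bucket, concatenate in priority order, and map names back with a direct reverse-lookup dict.
import Mathlib
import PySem

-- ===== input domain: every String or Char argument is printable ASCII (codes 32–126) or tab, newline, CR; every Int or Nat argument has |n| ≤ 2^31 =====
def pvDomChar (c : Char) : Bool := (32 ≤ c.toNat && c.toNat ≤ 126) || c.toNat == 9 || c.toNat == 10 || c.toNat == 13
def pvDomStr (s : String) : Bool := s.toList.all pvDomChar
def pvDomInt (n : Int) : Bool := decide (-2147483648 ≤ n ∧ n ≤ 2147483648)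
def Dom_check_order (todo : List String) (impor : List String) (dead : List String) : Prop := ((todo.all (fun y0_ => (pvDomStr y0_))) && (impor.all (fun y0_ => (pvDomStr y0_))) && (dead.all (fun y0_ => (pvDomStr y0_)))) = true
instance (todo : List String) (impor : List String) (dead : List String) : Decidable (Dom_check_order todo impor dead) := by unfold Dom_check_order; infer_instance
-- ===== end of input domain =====

-- B replaces A's global comparison sort plus nested int→name replacement loops by a per-priority
-- bucket pass (filter, sort each bucket, concatenate) with a direct reverse-name lookup
-- (objective: alternative decomposition, same output).

-- Python's `<` on (int, str, str) tuples: lexicographic, strings by code points (exact on the ASCII domain)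
def pvLt3 (a b : Int × String × String) : Bool :=
  decide (a.1 < b.1) ||
    (decide (a.1 = b.1) && (decide (a.2.1 < b.2.1) ||
      (decide (a.2.1 = b.2.1) && decide (a.2.2 < b.2.2))))

-- hand port of Python's stable sorted() on triples (PySem.List.sorted covers one- and two-component
-- keys, not three-tuple comparison): stable insertion sort — a later element is inserted after all
-- elements not greater than it, exactly Python's stable order
def pvIns (x : Int × String × String) : List (Int × String × String) → List (Int × String × String)
  | [] => [x]
  | y :: ys => if pvLt3 x y then x :: y :: ys else y :: pvIns x ys

def pvIsort (xs : List (Int × String × String)) : List (Int × String × String) :=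
  xs.foldl (fun acc x => pvIns x acc) []

-- ===== PORT A =====
def pvDictA : PySem.Dict String Int :=
  PySem.Dict.ofList [("Very High", 1), ("High", 2), ("Normal", 3), ("Low", 4)]

-- one pass of A's inner `for j in range(len(impor))` for the key i: int entries equal to
-- dictionary[i] become the string i; an already-replaced string entry compares unequal to an int
-- in Python and is left alone (the heterogeneous Python list is modelled as Int ⊕ String)
def pvRepl (i : String) (l : List (Int ⊕ String)) : List (Int ⊕ String) :=
  l.map (fun e => match e with
    | .inl v => if v = (pvDictA.get? i).getD 0 then .inr i else .inl v
    | .inr s => .inr s)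

def check_order (todo : List String) (impor : List String) (dead : List String) :
    List String × List String × List String :=
  -- dictionary[i]: the KeyError case (get? = none) is excluded by Pre_
  let list1 : List Int := impor.foldl (fun acc i => acc ++ [(pvDictA.get? i).getD 0]) []
  let sorted_pairs := pvIsort (List.zip list1 (List.zip todo dead))
  -- zip(*sorted_pairs) + list(...): the three columns (its ValueError on empty is excluded by Pre_)
  let imporM : List (Int ⊕ String) := (sorted_pairs.map (·.1)).map Sum.inl
  let imporR := pvDictA.keys.foldl (fun l i => pvRepl i l) imporM
  ( sorted_pairs.map (·.2.1)
  , imporR.map (fun e => match e with | .inr s => s | .inl _ => "")  -- inl unreachable: every dictionary value gets replaced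
  , sorted_pairs.map (·.2.2) )

-- ===== PORT B =====
def pvPriority : PySem.Dict String Int :=
  PySem.Dict.ofList [("Very High", 1), ("High", 2), ("Normal", 3), ("Low", 4)]

def pvNames : PySem.Dict Int String :=
  PySem.Dict.ofList [(1, "Very High"), (2, "High"), (3, "Normal"), (4, "Low")]

def check_order_alt (todo : List String) (impor : List String) (dead : List String) :
    List String × List String × List String :=
  let nums : List Int := impor.map (fun i => (pvPriority.get? i).getD 0)  -- KeyError excluded by Pre_
  let triples := List.zip nums (List.zip todo dead)
  -- for p in (1, 2, 3, 4): ordered.extend(sorted(bucket p))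
  let ordered := [(1 : Int), 2, 3, 4].foldl
    (fun acc p => acc ++ pvIsort (triples.filter (fun t => t.1 == p))) []
  let nums_s := ordered.map (·.1)
  ( ordered.map (·.2.1)
  , nums_s.map (fun p => (pvNames.get? p).getD "")
  , ordered.map (·.2.2) )

-- ===== PRECONDITION & SPEC =====
-- Pre_ excludes exactly the inputs on which A raises: a KeyError when some importance string is
-- not a dictionary key, and the ValueError of zip(*)-unpacking when any of the lists is empty.
def Pre_check_order (todo : List String) (impor : List String) (dead : List String) : Prop :=
  todo ≠ [] ∧ impor ≠ [] ∧ dead ≠ [] ∧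
    ∀ i ∈ impor, i = "Very High" ∨ i = "High" ∨ i = "Normal" ∨ i = "Low"
instance (todo : List String) (impor : List String) (dead : List String) :
    Decidable (Pre_check_order todo impor dead) := by unfold Pre_check_order; infer_instance

def pvWitness_check_order : List String × List String × List String :=
  (["wash", "cook"], ["Low", "High"], ["monday", "friday"])

def Spec_check_order (todo : List String) (impor : List String) (dead : List String)
    (out : List String × List String × List String) : Prop := out = check_order_alt todo impor dead
instance (todo : List String) (impor : List String) (dead : List String)
    (out : List String × List String × List String) : Decidable (Spec_check_order todo impor dead out) := by
  unfold Spec_check_order; infer_instance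

-- ===== CLAIM (what is proved, stated in full; the proofs are below) =====
def Claim_equal_check_order : Prop := ∀ (todo : List String) (impor : List String) (dead : List String), Dom_check_order todo impor dead → Pre_check_order todo impor dead → Spec_check_order todo impor dead (check_order todo impor dead)

-- ===== LEMMAS AND PROOFS =====

-- the Python tuple order, packaged as an injective key into a linear order
def pvKey (t : Int × String × String) : Lex (Int × Lex (String × String)) :=
  toLex (t.1, toLex (t.2.1, t.2.2))

theorem pvKey_injective : Function.Injective pvKey := by
  intro a b h
  simp only [pvKey, toLex_inj, Prod.mk.injEq] at h
  obtain ⟨h1, h2, h3⟩ := h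
  exact Prod.ext h1 (Prod.ext h2 h3)

theorem pvLt3_iff (a b : Int × String × String) : pvLt3 a b = true ↔ pvKey a < pvKey b := by
  simp [pvLt3, pvKey, Prod.Lex.lt_iff]

theorem pvLt3_false_iff (a b : Int × String × String) :
    pvLt3 a b = false ↔ pvKey b ≤ pvKey a := by
  rw [← not_lt, ← pvLt3_iff]
  simp

theorem mem_pvIns (x z : Int × String × String) (ys : List (Int × String × String)) :
    z ∈ pvIns x ys ↔ z = x ∨ z ∈ ys := by
  induction ys with
  | nil => simp [pvIns]
  | cons y ys ih =>
    simp only [pvIns]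
    split
    · simp
    · simp [ih]; tauto

theorem perm_pvIns (x : Int × String × String) (ys : List (Int × String × String)) :
    (pvIns x ys).Perm (x :: ys) := by
  induction ys with
  | nil => simp [pvIns]
  | cons y ys ih =>
    simp only [pvIns]
    split
    · exact List.Perm.refl _
    · exact (ih.cons y).trans (List.Perm.swap x y ys)

theorem pairwise_pvIns (x : Int × String × String) (ys : List (Int × String × String))
    (h : ys.Pairwise (fun a b => pvKey a ≤ pvKey b)) :
    (pvIns x ys).Pairwise (fun a b => pvKey a ≤ pvKey b) := by
  induction ys with
  | nil => simp [pvIns]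
  | cons y ys ih =>
    rcases List.pairwise_cons.mp h with ⟨hy, hys⟩
    simp only [pvIns]
    by_cases hlt : pvLt3 x y = true
    · simp only [hlt, if_true]
      refine List.pairwise_cons.mpr ⟨?_, h⟩
      intro b hb
      have hxy : pvKey x < pvKey y := (pvLt3_iff x y).mp hlt
      rcases List.mem_cons.mp hb with h1 | hb
      · rw [h1]; exact le_of_lt hxy
      · exact le_trans (le_of_lt hxy) (hy b hb)
    · have hyx : pvKey y ≤ pvKey x :=
        (pvLt3_false_iff x y).mp (Bool.not_eq_true _ ▸ eq_false_of_ne_true hlt)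
      simp only [Bool.not_eq_true] at hlt
      simp only [hlt, Bool.false_eq_true, if_false]
      refine List.pairwise_cons.mpr ⟨?_, ih hys⟩
      intro b hb
      rcases (mem_pvIns x b ys).mp hb with h1 | hb
      · rw [h1]; exact hyx
      · exact hy b hb

theorem perm_foldl_pvIns (xs : List (Int × String × String)) :
    ∀ acc, (xs.foldl (fun a x => pvIns x a) acc).Perm (xs ++ acc) := by
  induction xs with
  | nil => intro acc; simp
  | cons x xs ih =>
    intro acc
    show (xs.foldl (fun a x => pvIns x a) (pvIns x acc)).Perm ((x :: xs) ++ acc)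
    exact (ih _).trans ((List.Perm.append_left xs (perm_pvIns x acc)).trans List.perm_middle)

theorem perm_pvIsort (xs : List (Int × String × String)) : (pvIsort xs).Perm xs := by
  simpa using perm_foldl_pvIns xs []

theorem pairwise_foldl_pvIns (xs : List (Int × String × String)) :
    ∀ acc, acc.Pairwise (fun a b => pvKey a ≤ pvKey b) →
      (xs.foldl (fun a x => pvIns x a) acc).Pairwise (fun a b => pvKey a ≤ pvKey b) := by
  induction xs with
  | nil => intro acc h; simpa using h
  | cons x xs ih => intro acc h; exact ih _ (pairwise_pvIns x acc h)

theorem pairwise_pvIsort (xs : List (Int × String × String)) :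
    (pvIsort xs).Pairwise (fun a b => pvKey a ≤ pvKey b) :=
  pairwise_foldl_pvIns xs [] (by simp)

theorem mem_pvIsort (z : Int × String × String) (xs : List (Int × String × String)) :
    z ∈ pvIsort xs ↔ z ∈ xs := (perm_pvIsort xs).mem_iff

theorem perm_filters (Z : List (Int × String × String))
    (hZ : ∀ t ∈ Z, t.1 = 1 ∨ t.1 = 2 ∨ t.1 = 3 ∨ t.1 = 4) :
    Z.Perm (Z.filter (fun t => t.1 == 1) ++ (Z.filter (fun t => t.1 == 2) ++
      (Z.filter (fun t => t.1 == 3) ++ Z.filter (fun t => t.1 == 4)))) := by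
  induction Z with
  | nil => simp
  | cons t Z ih =>
    have ih' := ih (fun x hx => hZ x (List.mem_cons_of_mem t hx))
    rcases hZ t (List.mem_cons_self) with h | h | h | h
    · simp only [List.filter_cons, h]; norm_num
      exact ih'
    · simp only [List.filter_cons, h]; norm_num
      exact (ih'.cons t).trans List.perm_middle.symm
    · simp only [List.filter_cons, h]; norm_num
      exact (ih'.cons t).trans (List.perm_middle.symm.trans
        (List.Perm.append_left _ List.perm_middle.symm))
    · simp only [List.filter_cons, h]; norm_num
      exact (ih'.cons t).trans (List.perm_middle.symm.trans
        (List.Perm.append_left _ (List.perm_middle.symm.trans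
          (List.Perm.append_left _ List.perm_middle.symm))))

theorem fst_of_mem_isort_filter (p : Int) (Z : List (Int × String × String))
    (a : Int × String × String) (ha : a ∈ pvIsort (Z.filter (fun t => t.1 == p))) : a.1 = p := by
  have := (mem_pvIsort a _).mp ha
  have := (List.mem_filter.mp this).2
  exact by simpa using this

theorem le_of_fst_lt (a b : Int × String × String) (h : a.1 < b.1) : pvKey a ≤ pvKey b := by
  simp only [pvKey, Prod.Lex.le_iff]
  exact Or.inl h

-- A's single stable sort of the triples equals B's concatenation of per-priority sorted buckets
theorem pvIsort_buckets (Z : List (Int × String × String))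
    (hZ : ∀ t ∈ Z, t.1 = 1 ∨ t.1 = 2 ∨ t.1 = 3 ∨ t.1 = 4) :
    pvIsort Z = pvIsort (Z.filter (fun t => t.1 == 1)) ++ (pvIsort (Z.filter (fun t => t.1 == 2)) ++
      (pvIsort (Z.filter (fun t => t.1 == 3)) ++ pvIsort (Z.filter (fun t => t.1 == 4)))) := by
  apply PySem.List.eq_of_perm_of_pairwise_le_of_injective pvKey pvKey_injective
  · exact (perm_pvIsort Z).trans ((perm_filters Z hZ).trans
      ((perm_pvIsort _).symm.append ((perm_pvIsort _).symm.append
        ((perm_pvIsort _).symm.append (perm_pvIsort _).symm))))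
  · exact pairwise_pvIsort Z
  · refine List.pairwise_append.mpr ⟨pairwise_pvIsort _, ?_, ?_⟩
    · refine List.pairwise_append.mpr ⟨pairwise_pvIsort _, ?_, ?_⟩
      · refine List.pairwise_append.mpr ⟨pairwise_pvIsort _, pairwise_pvIsort _, ?_⟩
        intro a ha b hb
        have h1 := fst_of_mem_isort_filter 3 Z a ha
        have h2 := fst_of_mem_isort_filter 4 Z b hb
        exact le_of_fst_lt a b (by omega)
      · intro a ha b hb
        have h1 := fst_of_mem_isort_filter 2 Z a ha
        rcases List.mem_append.mp hb with hb | hb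
        · have h2 := fst_of_mem_isort_filter 3 Z b hb
          exact le_of_fst_lt a b (by omega)
        · have h2 := fst_of_mem_isort_filter 4 Z b hb
          exact le_of_fst_lt a b (by omega)
    · intro a ha b hb
      have h1 := fst_of_mem_isort_filter 1 Z a ha
      rcases List.mem_append.mp hb with hb | hb
      · have h2 := fst_of_mem_isort_filter 2 Z b hb
        exact le_of_fst_lt a b (by omega)
      rcases List.mem_append.mp hb with hb | hb
      · have h2 := fst_of_mem_isort_filter 3 Z b hb
        exact le_of_fst_lt a b (by omega)
      · have h2 := fst_of_mem_isort_filter 4 Z b hb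
        exact le_of_fst_lt a b (by omega)

-- A's nested replacement loops over the dictionary keys, acting on ints from {1,2,3,4},
-- amount to the direct reverse-name lookup B performs
theorem repl_eq (ns : List Int) (h : ∀ v ∈ ns, v = 1 ∨ v = 2 ∨ v = 3 ∨ v = 4) :
    (pvDictA.keys.foldl (fun l i => pvRepl i l) (ns.map Sum.inl)).map
      (fun e => match e with | .inr s => s | .inl _ => "")
      = ns.map (fun v => (pvNames.get? v).getD "") := by
  have hk : pvDictA.keys = ["Very High", "High", "Normal", "Low"] := rfl
  rw [hk]
  simp only [List.foldl_cons, List.foldl_nil, pvRepl, List.map_map]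
  refine List.map_congr_left ?_
  intro v hv
  rcases h v hv with rfl | rfl | rfl | rfl <;> rfl

-- ===== VERDICT (by name: the statement is the Claim_ definition above) =====
theorem check_order_spec : Claim_equal_check_order := by
  intro todo impor dead _ hpre
  obtain ⟨-, -, -, hkeys⟩ := hpre
  unfold Spec_check_order check_order check_order_alt
  have hdict : pvPriority = pvDictA := rfl
  rw [hdict, PySem.List.foldl_append_singleton_eq_map, List.nil_append]
  simp only [List.foldl_cons, List.foldl_nil, List.nil_append, List.append_assoc]
  set f : String → Int := fun i => (pvDictA.get? i).getD 0 with hf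
  set Z : List (Int × String × String) := List.zip (impor.map f) (List.zip todo dead) with hZdef
  have hfst : ∀ t ∈ Z, t.1 = 1 ∨ t.1 = 2 ∨ t.1 = 3 ∨ t.1 = 4 := by
    intro t ht
    rcases t with ⟨a, bc⟩
    have ha : a ∈ impor.map f := (List.of_mem_zip ht).1
    rcases List.mem_map.mp ha with ⟨i, hi, hfi⟩
    have e1 : f "Very High" = 1 := rfl
    have e2 : f "High" = 2 := rfl
    have e3 : f "Normal" = 3 := rfl
    have e4 : f "Low" = 4 := rfl
    subst hfi
    rcases hkeys i hi with rfl | rfl | rfl | rfl <;> simp [e1, e2, e3, e4]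
  rw [repl_eq _ (by
    intro v hv
    rcases List.mem_map.mp hv with ⟨t, ht, rfl⟩
    exact hfst t ((mem_pvIsort t Z).mp ht))]
  rw [pvIsort_buckets Z hfst]
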